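-- pv_equiv track=rewrite | github.com/dig-sec/mimir | src/wellspring/elastic_source/sync.py | _select_timestamp_field
-- ===== SOURCE A (Python) =====
-- from typing import Any, Callable, Dict, Iterable, List, Optional, Tuple
--
-- _DATE_FIELD_TYPES = {"date", "date_nanos"}
--
-- def _select_timestamp_field(
--     field_types: Dict[str, str], candidates: List[str]
-- ) -> Optional[str]:
--     first_existing: Optional[str] = None
--     for candidate in candidates:
--         field_type = field_types.get(candidate)
--         if field_type in _DATE_FIELD_TYPES:
--             return candidate
--         if field_type and first_existing is None:
--             first_existing = candidate
--     if first_existing: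
--         return first_existing
--     for candidate in candidates:
--         if candidate:
--             return candidate
--     return None
-- ===== SOURCE B (Python) =====
-- from typing import Dict, List, Optional
--
-- _DATE_FIELD_TYPES = {"date", "date_nanos"}
--
-- def _select_timestamp_field(
--     field_types: Dict[str, str], candidates: List[str]
-- ) -> Optional[str]:
--     dated = next((c for c in candidates if field_types.get(c) in _DATE_FIELD_TYPES), None)
--     if dated is not None:
--         return dated
--     existing = next((c for c in candidates if field_types.get(c)), None)
--     if existing:
--         return existing
--     return next((c for c in candidates if c), None)
-- ===== Notes on version B (the rewrite author's own statement) =====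
-- stated objective: idiomatic
-- what changed: Replaced the fused loop with its first_existing accumulator and trailing second loop by three independent next()-over-generator scans: first date-typed candidate, else first existing candidate (if truthy), else first non-empty candidate.
import Mathlib
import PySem

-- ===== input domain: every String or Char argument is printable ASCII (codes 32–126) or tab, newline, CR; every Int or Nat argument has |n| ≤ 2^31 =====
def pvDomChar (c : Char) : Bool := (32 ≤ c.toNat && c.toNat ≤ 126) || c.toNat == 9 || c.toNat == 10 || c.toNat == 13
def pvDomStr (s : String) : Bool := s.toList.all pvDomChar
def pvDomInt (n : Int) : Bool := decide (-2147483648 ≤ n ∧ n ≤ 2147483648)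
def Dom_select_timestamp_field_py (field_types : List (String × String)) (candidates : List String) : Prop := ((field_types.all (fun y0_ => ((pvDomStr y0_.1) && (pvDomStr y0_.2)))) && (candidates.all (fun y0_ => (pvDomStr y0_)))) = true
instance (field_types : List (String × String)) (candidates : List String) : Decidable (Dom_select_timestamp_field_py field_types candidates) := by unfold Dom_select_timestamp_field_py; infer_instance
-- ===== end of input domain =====

-- B replaces A's fused loop with the first_existing accumulator by three independent
-- next()/find? scans over the candidates (idiomatic decomposition; same O(n·m) cost).

-- shared helpers: dict.get on the association list (first match), the two tests
def pvGetType (field_types : List (String × String)) (c : String) : Option String :=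
  field_types.lookup c

def pyIsDate (t : Option String) : Bool :=
  t == some "date" || t == some "date_nanos"

def pyTruthy (t : Option String) : Bool :=
  match t with
  | some s => s != ""
  | none => false

-- ===== PORT A =====
-- the first for-loop: early return = .inl candidate, loop end = .inr first_existing
def aLoop (field_types : List (String × String)) : List String → Option String → String ⊕ Option String
  | [], fe => .inr fe
  | c :: rest, fe =>
    let t := pvGetType field_types c
    if pyIsDate t then .inl c
    else aLoop field_types rest (if pyTruthy t && fe.isNone then some c else fe)

-- the second for-loop: first truthy (non-empty) candidate
def aSecondLoop : List String → Option String
  | [] => none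
  | c :: rest => if c != "" then some c else aSecondLoop rest

def select_timestamp_field_py (field_types : List (String × String)) (candidates : List String) : Option String :=
  match aLoop field_types candidates none with
  | .inl c => some c
  | .inr fe =>
    match fe with
    | some s => if s != "" then some s else aSecondLoop candidates
    | none => aSecondLoop candidates

-- ===== PORT B =====
def select_timestamp_field_py_alt (field_types : List (String × String)) (candidates : List String) : Option String :=
  match candidates.find? (fun c => pyIsDate (pvGetType field_types c)) with
  | some c => some c
  | none =>
    match candidates.find? (fun c => pyTruthy (pvGetType field_types c)) with
    | some c => if c != "" then some c else candidates.find? (fun c => c != "")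
    | none => candidates.find? (fun c => c != "")

-- ===== PRECONDITION & SPEC =====
def Spec_select_timestamp_field_py (field_types : List (String × String)) (candidates : List String) (out : Option String) : Prop := out = select_timestamp_field_py_alt field_types candidates
instance (field_types : List (String × String)) (candidates : List String) (out : Option String) : Decidable (Spec_select_timestamp_field_py field_types candidates out) := by unfold Spec_select_timestamp_field_py; infer_instance

-- ===== CLAIM (what is proved, stated in full; the proofs are below) =====
def Claim_equal_select_timestamp_field_py : Prop := ∀ (field_types : List (String × String)) (candidates : List String), Dom_select_timestamp_field_py field_types candidates → Spec_select_timestamp_field_py field_types candidates (select_timestamp_field_py field_types candidates)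

-- ===== LEMMAS AND PROOFS =====

theorem aSecondLoop_eq_find (cands : List String) :
    aSecondLoop cands = cands.find? (fun c => c != "") := by
  induction cands with
  | nil => rfl
  | cons c rest ih =>
    simp only [aSecondLoop, List.find?]
    by_cases h : (c != "") = true
    · simp [h]
    · simp [h, ih]

theorem aLoop_char (field_types : List (String × String)) (cands : List String) (fe : Option String) :
    aLoop field_types cands fe =
      match cands.find? (fun c => pyIsDate (pvGetType field_types c)) with
      | some c => .inl c
      | none => .inr (fe.orElse (fun _ => cands.find? (fun c => pyTruthy (pvGetType field_types c)))) := by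
  induction cands generalizing fe with
  | nil => cases fe <;> rfl
  | cons c rest ih =>
    simp only [aLoop, List.find?]
    by_cases hd : pyIsDate (pvGetType field_types c) = true
    · simp [hd]
    · simp only [hd, if_neg, Bool.not_eq_true] at *
      rw [ih]
      by_cases ht : pyTruthy (pvGetType field_types c) = true
      · cases fe <;> simp [ht, Option.orElse]
      · cases fe <;> simp [ht, Option.orElse]

-- ===== VERDICT (by name: the statement is the Claim_ definition above) =====
theorem select_timestamp_field_py_spec : Claim_equal_select_timestamp_field_py := by
  intro field_types candidates _
  unfold Spec_select_timestamp_field_py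
  unfold select_timestamp_field_py select_timestamp_field_py_alt
  rw [aLoop_char, aSecondLoop_eq_find]
  cases hd : candidates.find? (fun c => pyIsDate (pvGetType field_types c)) with
  | some c => simp
  | none =>
    cases ht : candidates.find? (fun c => pyTruthy (pvGetType field_types c)) <;>
      simp [Option.orElse]
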